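-- pv_equiv track=rewrite | github.com/laols574/memm-classifier99 | memm.py | create_tuples
-- ===== SOURCE A (Python) =====
-- def create_tuples(file_array):
--     sentence = []
--     tags = []
--     array_of_tuples = []
--     for line in file_array:
--         if(line == "\n" or line == "\t\n"):
--             array_of_tuples.append((sentence, tags))
--             sentence = []
--             tags = []
--         else:
--             line = line.split(None, 1)
--             sentence.append(line[0])
--             tags.append(line[1].strip())
--     return array_of_tuples
-- ===== SOURCE B (Python) =====
-- def create_tuples(file_array):
--     # Pass 1: parse every line up front; None marks a sentence boundary.
--     parsed = []
--     for line in file_array: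
--         if line == "\n" or line == "\t\n":
--             parsed.append(None)
--         else:
--             parts = line.split(None, 1)
--             parsed.append((parts[0], parts[1].strip()))
--
--     # Pass 2: recursively cut at the first boundary marker and unzip that
--     # segment; an unterminated trailing segment yields no pair.
--     def group(items):
--         if None not in items:
--             return []
--         i = items.index(None)
--         seg = items[:i]
--         return [([w for w, _ in seg], [t for _, t in seg])] + group(items[i + 1:])
--
--     return group(parsed)
-- ===== Notes on version B (the rewrite author's own statement) =====
-- stated objective: alternative
-- what changed: B works in two staged passes - first it parses every line into an Option-like list of (token, stripped tag) pairs with None boundary markers, then it recursively cuts that list at the first marker and unzips each whole segment - instead of A's single imperative loop that mutates and resets two parallel accumulators.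
import Mathlib
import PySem

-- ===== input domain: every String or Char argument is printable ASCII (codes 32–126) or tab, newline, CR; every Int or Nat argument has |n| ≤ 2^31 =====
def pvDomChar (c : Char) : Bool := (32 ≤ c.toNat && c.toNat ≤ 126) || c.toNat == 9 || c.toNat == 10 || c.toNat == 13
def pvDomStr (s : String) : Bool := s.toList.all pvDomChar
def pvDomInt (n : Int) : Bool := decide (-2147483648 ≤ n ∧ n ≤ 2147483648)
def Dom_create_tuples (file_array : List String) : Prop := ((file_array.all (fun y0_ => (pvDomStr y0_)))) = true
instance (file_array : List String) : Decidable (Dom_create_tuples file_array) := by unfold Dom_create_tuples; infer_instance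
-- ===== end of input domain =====

-- B replaces A's single accumulator loop by a staged parse-then-recursive-grouping pass; equal return values proved on Pre_.

-- ===== PORT A =====
-- first token of line.split(None, 1); under Pre_ the index is in range, .getD "" totalizes
def pvTok (line : String) : String :=
  (PySem.List.pyGet? (PySem.Str.split₀Max line 1) 0).getD ""
-- line.split(None, 1)[1].strip(); under Pre_ the index is in range
def pvTag (line : String) : String :=
  PySem.Str.strip ((PySem.List.pyGet? (PySem.Str.split₀Max line 1) 1).getD "")

def pvStepA (st : List String × List String × List (List String × List String))
    (line : String) : List String × List String × List (List String × List String) :=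
  if line = "\n" ∨ line = "\t\n" then
    ([], [], st.2.2 ++ [(st.1, st.2.1)])
  else
    (st.1 ++ [pvTok line], st.2.1 ++ [pvTag line], st.2.2)

def create_tuples (file_array : List String) : List (List String × List String) :=
  (file_array.foldl pvStepA ([], [], [])).2.2

-- ===== PORT B =====
-- pass 1: parse one line; none is Source B's None boundary marker
def pvParseLine (line : String) : Option (String × String) :=
  if line == "\n" || line == "\t\n" then none else some (pvTok line, pvTag line)

-- pass 2: Source B's group(): items.index(None) cuts the list at the first marker, so
-- items[:i] is takeWhile isSome and items[i:] is dropWhile isSome — exact; every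
-- element of items[:i] is `some`, so .getD ("", "") only unwraps it.
def pvGroup (items : List (Option (String × String))) : List (List String × List String) :=
  match h : items.dropWhile Option.isSome with
  | [] => []
  | _ :: tail =>
    let seg := (items.takeWhile Option.isSome).map (fun p => p.getD ("", ""))
    (seg.map Prod.fst, seg.map Prod.snd) :: pvGroup tail
termination_by items.length
decreasing_by
  have hle := List.length_dropWhile_le (p := Option.isSome) (l := items)
  rw [h] at hle
  simpa using Nat.lt_of_lt_of_le (Nat.lt_succ_self _) hle

def create_tuples_alt (file_array : List String) : List (List String × List String) :=
  pvGroup (file_array.map pvParseLine)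

-- ===== PRECONDITION & SPEC =====
-- Pre_ excludes exactly the inputs where Python A raises IndexError: a line that is
-- neither blank marker and has fewer than two whitespace-separated tokens.
def Pre_create_tuples (file_array : List String) : Prop :=
  ∀ line ∈ file_array,
    line = "\n" ∨ line = "\t\n" ∨ 2 ≤ (PySem.Str.split₀Max line 1).length
instance (file_array : List String) : Decidable (Pre_create_tuples file_array) := by
  unfold Pre_create_tuples; infer_instance

def pvWitness_create_tuples : List String := ["the dog\n", "\n", "a cat\n", "\t\n"]

def Spec_create_tuples (file_array : List String) (out : List (List String × List String)) : Prop := out = create_tuples_alt file_array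
instance (file_array : List String) (out : List (List String × List String)) : Decidable (Spec_create_tuples file_array out) := by unfold Spec_create_tuples; infer_instance

-- ===== CLAIM (what is proved, stated in full; the proofs are below) =====
def Claim_equal_create_tuples : Prop := ∀ (file_array : List String), Dom_create_tuples file_array → Pre_create_tuples file_array → Spec_create_tuples file_array (create_tuples file_array)

-- ===== LEMMAS AND PROOFS =====

-- proof-only recursive characterisation of A's fold, on the parsed list
def pvGlueP (s t : List String) : List (Option (String × String)) → List (List String × List String)
  | [] => []
  | none :: rest => (s, t) :: pvGlueP [] [] rest
  | some p :: rest => pvGlueP (s ++ [p.1]) (t ++ [p.2]) rest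

lemma pv_foldA_glueP (fa : List String) (s t : List String)
    (out : List (List String × List String)) :
    (fa.foldl pvStepA (s, t, out)).2.2 = out ++ pvGlueP s t (fa.map pvParseLine) := by
  induction fa generalizing s t out with
  | nil => simp [pvGlueP]
  | cons line rest ih =>
    by_cases h : line = "\n" ∨ line = "\t\n"
    · have hp : pvParseLine line = none := by
        rcases h with h | h <;> simp [pvParseLine, h]
      simp [List.foldl_cons, pvStepA, h, hp, pvGlueP, ih, List.append_assoc]
    · have hp : pvParseLine line = some (pvTok line, pvTag line) := by
        push Not at h
        simp [pvParseLine, h.1, h.2]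
      simp [List.foldl_cons, pvStepA, h, hp, pvGlueP, ih]

-- pvGlueP with pending accumulators, characterised by the first-marker split
lemma pv_glueP_split (items : List (Option (String × String))) (s t : List String) :
    pvGlueP s t items =
      match items.dropWhile Option.isSome with
      | [] => []
      | _ :: tail =>
        let seg := (items.takeWhile Option.isSome).map (fun p => p.getD ("", ""))
        (s ++ seg.map Prod.fst, t ++ seg.map Prod.snd) :: pvGlueP [] [] tail := by
  induction items generalizing s t with
  | nil => simp [pvGlueP, List.dropWhile]
  | cons p rest ih =>
    cases p with
    | none => simp [pvGlueP, List.dropWhile_cons, List.takeWhile_cons]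
    | some q =>
      rw [pvGlueP, ih]
      rcases hdw : rest.dropWhile Option.isSome with _ | ⟨x, tail⟩
      · simp [hdw]
      · simp [List.takeWhile_cons, hdw]

-- pvGlueP [] [] is B's group()
lemma pv_glueP_group (items : List (Option (String × String))) :
    pvGlueP [] [] items = pvGroup items := by
  induction hn : items.length using Nat.strong_induction_on generalizing items with
  | _ n ih =>
    rw [pv_glueP_split, pvGroup]
    cases hdrop : items.dropWhile Option.isSome with
    | nil => simp
    | cons x tail =>
      have hlt : tail.length < n := by
        have hle := List.length_dropWhile_le (p := Option.isSome) (l := items)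
        rw [hdrop] at hle
        subst hn
        simpa using Nat.lt_of_lt_of_le (Nat.lt_succ_self _) hle
      simp only []
      rw [ih tail.length hlt tail rfl]
      simp

-- ===== VERDICT (by name: the statement is the Claim_ definition above) =====
theorem create_tuples_spec : Claim_equal_create_tuples := by
  intro fa _ _
  unfold Spec_create_tuples create_tuples create_tuples_alt
  rw [pv_foldA_glueP, pv_glueP_group]
  simp
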